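-- pv_equiv track=rewrite | github.com/M0oser/StyleMate | services/scenario_rules.py | infer_request_gender
-- ===== SOURCE A (Python) =====
-- from collections import Counter
-- from typing import Any, Iterable, Mapping, Sequence
--
-- def infer_request_gender(anchor_items: Sequence[Mapping[str, Any]], explicit_gender_target: str | None) -> str:
--     if explicit_gender_target:
--         return explicit_gender_target
--
--     gender_counter = Counter(
--         (item.get("gender_target") or "").strip().lower()
--         for item in anchor_items
--         if (item.get("gender_target") or "").strip()
--     )
--     for gender in ("women", "broad", "unisex", "men"):
--         if gender_counter.get(gender):
--             return gender
--     return "women"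
-- ===== SOURCE B (Python) =====
-- RANK = {"women": 0, "broad": 1, "unisex": 2, "men": 3}
-- NAMES = ("women", "broad", "unisex", "men")
--
-- def infer_request_gender(anchor_items, explicit_gender_target):
--     if explicit_gender_target:
--         return explicit_gender_target
--     best = 4
--     for item in anchor_items:
--         r = RANK.get((item.get("gender_target") or "").strip().lower())
--         if r is not None and r < best:
--             best = r
--     return NAMES[best] if best < 4 else "women"
-- ===== Notes on version B (the rewrite author's own statement) =====
-- stated objective: alternative
-- what changed: Replaced the Counter build plus a scan of a fixed priority list by a single pass that maintains the minimum priority rank seen so far and indexes a names tuple at the end.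
import Mathlib
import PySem

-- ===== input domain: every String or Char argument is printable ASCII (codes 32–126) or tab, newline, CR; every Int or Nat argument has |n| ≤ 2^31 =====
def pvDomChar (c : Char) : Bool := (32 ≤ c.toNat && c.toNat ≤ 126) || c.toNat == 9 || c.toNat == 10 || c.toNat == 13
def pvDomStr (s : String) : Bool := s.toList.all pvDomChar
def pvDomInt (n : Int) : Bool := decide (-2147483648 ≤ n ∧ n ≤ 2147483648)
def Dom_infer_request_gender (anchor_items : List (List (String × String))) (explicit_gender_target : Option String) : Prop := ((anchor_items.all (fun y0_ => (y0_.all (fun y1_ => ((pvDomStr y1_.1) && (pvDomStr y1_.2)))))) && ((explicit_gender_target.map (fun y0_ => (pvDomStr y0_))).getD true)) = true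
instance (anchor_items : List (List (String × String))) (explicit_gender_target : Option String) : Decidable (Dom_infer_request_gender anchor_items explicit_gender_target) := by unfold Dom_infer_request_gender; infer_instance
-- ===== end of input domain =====

-- B replaces A's Counter-then-priority-scan by a single pass keeping the minimum priority rank (alternative decomposition, same cost).

-- ===== PORT A =====
-- item.get("gender_target") or ""  (values are strings; None and "" both normalize to "")
def pvRawGender (item : List (String × String)) : String :=
  ((PySem.Dict.mk item).get? "gender_target").getD ""

def infer_request_gender (anchor_items : List (List (String × String))) (explicit_gender_target : Option String) : String :=
  -- if explicit_gender_target: return explicit_gender_target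
  match explicit_gender_target with
  | some s =>
    if s ≠ "" then s else infer_request_gender_body anchor_items
  | none => infer_request_gender_body anchor_items
where
  infer_request_gender_body (anchor_items : List (List (String × String))) : String :=
    let gender_counter : PySem.Dict String Int :=
      PySem.Dict.counter
        ((anchor_items.filter (fun item => PySem.Str.strip (pvRawGender item) ≠ "")).map
          (fun item => PySem.Str.lower (PySem.Str.strip (pvRawGender item))))
    if gender_counter.getD "women" 0 ≠ 0 then "women"
    else if gender_counter.getD "broad" 0 ≠ 0 then "broad"
    else if gender_counter.getD "unisex" 0 ≠ 0 then "unisex"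
    else if gender_counter.getD "men" 0 ≠ 0 then "men"
    else "women"

-- ===== PORT B =====
-- RANK.get(g)
def pvRankGet (g : String) : Option Nat :=
  if g = "women" then some 0
  else if g = "broad" then some 1
  else if g = "unisex" then some 2
  else if g = "men" then some 3
  else none

-- NAMES[r]
def pvNames (r : Nat) : String :=
  match r with
  | 0 => "women"
  | 1 => "broad"
  | 2 => "unisex"
  | _ => "men"

def infer_request_gender_alt (anchor_items : List (List (String × String))) (explicit_gender_target : Option String) : String :=
  match explicit_gender_target with
  | some s =>
    if s ≠ "" then s else infer_request_gender_alt_body anchor_items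
  | none => infer_request_gender_alt_body anchor_items
where
  infer_request_gender_alt_body (anchor_items : List (List (String × String))) : String :=
    let best :=
      anchor_items.foldl
        (fun best item =>
          match pvRankGet (PySem.Str.lower (PySem.Str.strip (pvRawGender item))) with
          | some r => if r < best then r else best
          | none => best)
        4
    if best < 4 then pvNames best else "women"

-- ===== PRECONDITION & SPEC =====
def Spec_infer_request_gender (anchor_items : List (List (String × String))) (explicit_gender_target : Option String) (out : String) : Prop := out = infer_request_gender_alt anchor_items explicit_gender_target
instance (anchor_items : List (List (String × String))) (explicit_gender_target : Option String) (out : String) : Decidable (Spec_infer_request_gender anchor_items explicit_gender_target out) := by unfold Spec_infer_request_gender; infer_instance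

-- ===== CLAIM (what is proved, stated in full; the proofs are below) =====
def Claim_equal_infer_request_gender : Prop := ∀ (anchor_items : List (List (String × String))) (explicit_gender_target : Option String), Dom_infer_request_gender anchor_items explicit_gender_target → Spec_infer_request_gender anchor_items explicit_gender_target (infer_request_gender anchor_items explicit_gender_target)

-- ===== LEMMAS AND PROOFS =====

-- the normalized gender of one item
def pvNorm (item : List (String × String)) : String :=
  PySem.Str.lower (PySem.Str.strip (pvRawGender item))

-- B's loop step
def pvStep (best : Nat) (item : List (String × String)) : Nat :=
  match pvRankGet (pvNorm item) with
  | some r => if r < best then r else best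
  | none => best

-- minimum rank over a list, B's fold from 4
def pvMinRank (items : List (List (String × String))) : Nat :=
  items.foldl pvStep 4

lemma pvStep_le (b : Nat) (it : List (String × String)) : pvStep b it ≤ b := by
  unfold pvStep
  cases pvRankGet (pvNorm it) with
  | none => simp
  | some r => simp only; split <;> omega

lemma pvStep_min (b : Nat) (it : List (String × String)) (hb : b ≤ 4) :
    pvStep b it = min b (pvStep 4 it) := by
  unfold pvStep pvRankGet
  by_cases h0 : pvNorm it = "women" <;> by_cases h1 : pvNorm it = "broad" <;>
    by_cases h2 : pvNorm it = "unisex" <;> by_cases h3 : pvNorm it = "men" <;>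
    simp_all [Nat.min_def] <;> split_ifs <;> omega

lemma pvFoldl_step (items : List (List (String × String))) (b : Nat) (hb : b ≤ 4) :
    items.foldl pvStep b = min b (pvMinRank items) := by
  induction items generalizing b with
  | nil =>
    simp only [pvMinRank, List.foldl_nil]
    omega
  | cons it t ih =>
    simp only [pvMinRank, List.foldl_cons] at *
    rw [ih (pvStep b it) (le_trans (pvStep_le b it) hb),
      ih (pvStep 4 it) (pvStep_le 4 it), pvStep_min b it hb]
    simp [Nat.min_def]
    split_ifs <;> omega

-- pvStep 4 as an explicit rank table
lemma pvStep_four (it : List (String × String)) :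
    pvStep 4 it =
      if pvNorm it = "women" then 0
      else if pvNorm it = "broad" then 1
      else if pvNorm it = "unisex" then 2
      else if pvNorm it = "men" then 3
      else 4 := by
  unfold pvStep pvRankGet
  by_cases h0 : pvNorm it = "women" <;> by_cases h1 : pvNorm it = "broad" <;>
    by_cases h2 : pvNorm it = "unisex" <;> by_cases h3 : pvNorm it = "men" <;>
    simp_all

-- characterization of the minimum rank by occurrences of the four targets
lemma pvMinRank_char (items : List (List (String × String))) :
    pvMinRank items =
      if ∃ a ∈ items, pvNorm a = "women" then 0
      else if ∃ a ∈ items, pvNorm a = "broad" then 1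
      else if ∃ a ∈ items, pvNorm a = "unisex" then 2
      else if ∃ a ∈ items, pvNorm a = "men" then 3
      else 4 := by
  induction items with
  | nil => simp [pvMinRank]
  | cons it t ih =>
    have hfold : pvMinRank (it :: t) = min (pvStep 4 it) (pvMinRank t) := by
      simp only [pvMinRank, List.foldl_cons]
      exact pvFoldl_step t (pvStep 4 it) (pvStep_le 4 it)
    rw [hfold, ih, pvStep_four]
    by_cases h0 : pvNorm it = "women" <;> by_cases h1 : pvNorm it = "broad" <;>
      by_cases h2 : pvNorm it = "unisex" <;> by_cases h3 : pvNorm it = "men" <;>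
      by_cases m0 : ∃ a ∈ t, pvNorm a = "women" <;>
      by_cases m1 : ∃ a ∈ t, pvNorm a = "broad" <;>
      by_cases m2 : ∃ a ∈ t, pvNorm a = "unisex" <;>
      by_cases m3 : ∃ a ∈ t, pvNorm a = "men" <;>
      simp [h0, h1, h2, h3, m0, m1, m2, m3, List.mem_cons]

-- membership in A's filtered-normalized list equals an occurrence in items, for nonempty targets
lemma pvMem_filter_iff (items : List (List (String × String))) (g : String) (hg : g ≠ "") :
    (g ∈ (items.filter (fun item => PySem.Str.strip (pvRawGender item) ≠ "")).map
          (fun item => PySem.Str.lower (PySem.Str.strip (pvRawGender item)))) ↔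
      ∃ a ∈ items, pvNorm a = g := by
  simp only [List.mem_map, List.mem_filter, pvNorm]
  constructor
  · rintro ⟨it, ⟨hmem, _⟩, hn⟩
    exact ⟨it, hmem, hn⟩
  · rintro ⟨it, hmem, hn⟩
    refine ⟨it, ⟨hmem, ?_⟩, hn⟩
    by_cases h : PySem.Str.strip (pvRawGender it) = ""
    · rw [h] at hn
      exfalso
      apply hg
      rw [← hn]
      decide
    · simpa using h

-- the two bodies agree
lemma pvBody_eq (items : List (List (String × String))) :
    infer_request_gender.infer_request_gender_body items =
      infer_request_gender_alt.infer_request_gender_alt_body items := by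
  unfold infer_request_gender.infer_request_gender_body
    infer_request_gender_alt.infer_request_gender_alt_body
  simp only [PySem.Dict.getD_counter]
  have hB : items.foldl
      (fun best item =>
        match pvRankGet (PySem.Str.lower (PySem.Str.strip (pvRawGender item))) with
        | some r => if r < best then r else best
        | none => best) 4 = pvMinRank items := by
    have hf : (fun (best : Nat) (item : List (String × String)) =>
        match pvRankGet (PySem.Str.lower (PySem.Str.strip (pvRawGender item))) with
        | some r => if r < best then r else best
        | none => best) = pvStep := by
      funext b it
      unfold pvStep pvNorm
      cases pvRankGet (PySem.Str.lower (PySem.Str.strip (pvRawGender it))) <;> rfl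
    rw [hf]
    rfl
  have hcount : ∀ g : String, g ≠ "" →
      ((((items.filter (fun item => PySem.Str.strip (pvRawGender item) ≠ "")).map
          (fun item => PySem.Str.lower (PySem.Str.strip (pvRawGender item)))).count g : Int) ≠ 0 ↔
        ∃ a ∈ items, pvNorm a = g) := by
    intro g hg
    rw [← pvMem_filter_iff items g hg]
    rw [← List.count_pos_iff]
    omega
  rw [hB, pvMinRank_char]
  by_cases h0 : ∃ a ∈ items, pvNorm a = "women" <;>
    by_cases h1 : ∃ a ∈ items, pvNorm a = "broad" <;>
    by_cases h2 : ∃ a ∈ items, pvNorm a = "unisex" <;>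
    by_cases h3 : ∃ a ∈ items, pvNorm a = "men" <;>
    simp only [hcount "women" (by decide), hcount "broad" (by decide),
      hcount "unisex" (by decide), hcount "men" (by decide)] <;>
    simp [h0, h1, h2, h3, pvNames]

-- ===== VERDICT (by name: the statement is the Claim_ definition above) =====
theorem infer_request_gender_spec : Claim_equal_infer_request_gender := by
  intro anchor_items explicit_gender_target _
  unfold Spec_infer_request_gender infer_request_gender infer_request_gender_alt
  cases explicit_gender_target with
  | none => exact pvBody_eq anchor_items
  | some s =>
    by_cases hs : s = "" <;> simp [hs, pvBody_eq anchor_items]
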